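-- pv_equiv track=rewrite | github.com/beautiful-numbers/sigma-rectangle-arxiv2025 | sigma-rectangle-2025-companion/budget_vs_cost/bnb_lock_engine.py | build_M_y
-- ===== SOURCE A (Python) =====
-- import math
-- from typing import Dict, List, Tuple, Optional, Set, Iterable
--
-- def lcm(a: int, b: int) -> int:
--     return abs(a*b)//math.gcd(a,b)
--
-- def lcm_many(vals: Iterable[int]) -> int:
--     L = 1
--     for v in vals:
--         L = lcm(L, v)
--     return L
--
-- def build_M_y(K_max: int, allow_even_exps=True, allow_one_odd_euler=True) -> int:
--     Ks = set()
--     if allow_even_exps: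
--         for e in range(2, K_max+1):
--             if e % 2 == 0:
--                 Ks.add(e+1)
--     if allow_one_odd_euler:
--         for e in range(1, K_max+1, 2):
--             if e % 4 == 1:
--                 Ks.add(e+1)
--     Ks = [k for k in Ks if k >= 2 and k <= (K_max+1)]
--     if not Ks:
--         return 1
--     return lcm_many(Ks)
-- ===== SOURCE B (Python) =====
-- def _factor(v):
--     # trial division up to sqrt: list of (prime, exponent) pairs, ascending primes
--     fs = []
--     n = v
--     p = 2
--     while p * p <= n:
--         e = 0
--         while n % p == 0:
--             n //= p
--             e += 1
--         if e:
--             fs.append((p, e))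
--         p += 1
--     if n > 1:
--         fs.append((n, 1))
--     return fs
--
-- def build_M_y(K_max: int, allow_even_exps=True, allow_one_odd_euler=True) -> int:
--     # LCM via prime factorization: keep the max exponent seen for each prime,
--     # then multiply the prime powers back together.
--     values = []
--     if allow_even_exps:
--         values += range(3, K_max + 2, 2)
--     if allow_one_odd_euler:
--         values += range(2, K_max + 2, 4)
--     maxexp = {}
--     for v in values:
--         for p, e in _factor(v):
--             if maxexp.get(p, 0) < e:
--                 maxexp[p] = e
--     result = 1
--     for p, e in maxexp.items():
--         result *= p ** e
--     return result
-- ===== Notes on version B (the rewrite author's own statement) =====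
-- stated objective: alternative
-- what changed: Computes the LCM by prime factorization instead of gcd folding: each selected value is trial-divided into prime powers, a dict keeps the maximum exponent seen per prime, and the result is the product p**e over that dict (A instead folds abs(a*b)//gcd(a,b) over a set it builds and re-filters).
import Mathlib
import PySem

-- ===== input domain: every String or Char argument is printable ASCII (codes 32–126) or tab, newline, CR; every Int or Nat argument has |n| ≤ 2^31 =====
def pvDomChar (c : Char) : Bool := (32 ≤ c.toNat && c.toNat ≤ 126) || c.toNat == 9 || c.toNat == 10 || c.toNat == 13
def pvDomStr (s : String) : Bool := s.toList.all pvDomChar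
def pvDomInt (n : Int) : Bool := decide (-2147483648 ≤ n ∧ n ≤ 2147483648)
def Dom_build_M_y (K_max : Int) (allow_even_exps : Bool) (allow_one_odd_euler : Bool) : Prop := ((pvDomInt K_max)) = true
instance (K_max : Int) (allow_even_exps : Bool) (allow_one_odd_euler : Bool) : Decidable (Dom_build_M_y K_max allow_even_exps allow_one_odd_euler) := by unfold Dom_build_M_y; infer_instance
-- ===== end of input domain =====

-- B computes the same LCM by prime factorization (trial division + a dict of per-prime
-- maximum exponents, multiplied back together) instead of A's set building + gcd folding
-- (objective: alternative).

-- ===== PORT A =====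
-- lcm(a, b): abs(a*b)//math.gcd(a,b).  math.gcd is ported by hand as ↑(Int.gcd a b):
-- exact, since math.gcd returns the nonnegative gcd of the absolute values.
def pyLcm (a b : Int) : Int :=
  PySem.Int.floordiv |a * b| ((Int.gcd a b : Nat) : Int)

def lcm_many (vals : List Int) : Int :=
  vals.foldl (fun L v => pyLcm L v) 1

def build_M_y (K_max : Int) (allow_even_exps : Bool) (allow_one_odd_euler : Bool) : Int :=
  let Ks : PySem.Set Int := PySem.Set.empty
  let Ks : PySem.Set Int :=
    if allow_even_exps then
      (PySem.List.pyRange 2 (K_max + 1) 1).foldl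
        (fun s e => if PySem.Int.mod e 2 == 0 then PySem.Set.add s (e + 1) else s) Ks
    else Ks
  let Ks : PySem.Set Int :=
    if allow_one_odd_euler then
      (PySem.List.pyRange 1 (K_max + 1) 2).foldl
        (fun s e => if PySem.Int.mod e 4 == 1 then PySem.Set.add s (e + 1) else s) Ks
    else Ks
  -- [k for k in Ks if k >= 2 and k <= K_max+1]  (lcm_many's result does not depend on the set's iteration order)
  let Ks2 : List Int := Ks.filter (fun k => 2 ≤ k && k ≤ K_max + 1)
  if Ks2 = [] then 1 else lcm_many Ks2

-- ===== PORT B =====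
-- the inner 'while n % p == 0: n //= p; e += 1' of _factor; the dite guard's extra
-- conjuncts (2 ≤ p, 1 ≤ n) only make the recursion total — they hold at every state
-- the Python loop reaches (where it would otherwise diverge, e.g. n = 0)
lemma trial_div_lt (p n : Int) (h : 2 ≤ p ∧ 1 ≤ n ∧ PySem.Int.mod n p = 0) :
    (PySem.Int.floordiv n p).toNat < n.toNat := by
  obtain ⟨hp, hn, hm⟩ := h
  have hd : p ∣ n := (PySem.Int.mod_eq_zero_iff_dvd n p).1 hm
  rw [PySem.Int.floordiv_eq_ediv_of_pos (by omega)]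
  obtain ⟨q, rfl⟩ := hd
  rw [Int.mul_ediv_cancel_left _ (by omega : p ≠ 0)]
  have hq : 1 ≤ q := by nlinarith
  have : q < p * q := by nlinarith
  omega

def trialDivLoop (p n e : Int) : Int × Int :=
  if h : 2 ≤ p ∧ 1 ≤ n ∧ PySem.Int.mod n p = 0 then
    trialDivLoop p (PySem.Int.floordiv n p) (e + 1)
  else (n, e)
termination_by n.toNat
decreasing_by exact trial_div_lt p n h

-- bound for the outer while's termination: the inner loop keeps 1 ≤ n and never increases n
lemma trialDivLoop_fst_bounds (p : Int) (hp : 2 ≤ p) :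
    ∀ (fuel : Nat) (n e : Int), n.toNat ≤ fuel → 1 ≤ n →
      1 ≤ (trialDivLoop p n e).1 ∧ (trialDivLoop p n e).1 ≤ n := by
  intro fuel
  induction fuel with
  | zero => intro n e hf hn; exfalso; omega
  | succ f ih =>
    intro n e hf hn
    rw [trialDivLoop]
    by_cases hc : 2 ≤ p ∧ 1 ≤ n ∧ PySem.Int.mod n p = 0
    · rw [dif_pos hc]
      have hlt := trial_div_lt p n hc
      have h1 : 1 ≤ PySem.Int.floordiv n p := by
        obtain ⟨q, hq⟩ := (PySem.Int.mod_eq_zero_iff_dvd n p).1 hc.2.2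
        have hfd : PySem.Int.floordiv n p = q := by
          rw [hq, PySem.Int.floordiv_eq_ediv_of_pos (by omega),
            Int.mul_ediv_cancel_left _ (by omega : p ≠ 0)]
        rw [hfd]; nlinarith
      have := ih (PySem.Int.floordiv n p) (e + 1) (by omega) h1
      exact ⟨this.1, by omega⟩
    · rw [dif_neg hc]; exact ⟨hn, le_refl n⟩

-- _factor's outer 'while p * p <= n' loop; the dite guard's extra conjunct 2 ≤ p is a
-- totality guard only — it holds at every state the Python loop reaches
def factorLoop (n p : Int) (fs : List (Int × Int)) : Int × List (Int × Int) :=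
  if h : 2 ≤ p ∧ p * p ≤ n then
    let r := trialDivLoop p n 0
    factorLoop r.1 (p + 1) (if r.2 ≠ 0 then fs ++ [(p, r.2)] else fs)
  else (n, fs)
termination_by (n + 1 - p).toNat
decreasing_by
  have hn1 : 1 ≤ n := by nlinarith [h.1, h.2]
  have hb := trialDivLoop_fst_bounds p h.1 n.toNat n 0 le_rfl hn1
  have hpn : p ≤ n := by nlinarith [h.1, h.2]
  omega

-- _factor(v): trial division up to sqrt, then the prime remainder (if n > 1)
def pyFactor (v : Int) : List (Int × Int) :=
  let r := factorLoop v 2 []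
  if 1 < r.1 then r.2 ++ [(r.1, 1)] else r.2

def build_M_y_alt (K_max : Int) (allow_even_exps : Bool) (allow_one_odd_euler : Bool) : Int :=
  let values : List Int :=
    (if allow_even_exps then PySem.List.pyRange 3 (K_max + 2) 2 else [])
      ++ (if allow_one_odd_euler then PySem.List.pyRange 2 (K_max + 2) 4 else [])
  let maxexp : PySem.Dict Int Int :=
    values.foldl (fun d v =>
      (pyFactor v).foldl
        (fun d pe => if PySem.Dict.getD d pe.1 0 < pe.2 then PySem.Dict.insert d pe.1 pe.2 else d)
        d)
      PySem.Dict.empty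
  -- p ** e with e ≥ 1 (every stored exponent), so the .toNat on the exponent is exact
  maxexp.items.foldl (fun r pe => r * pe.1 ^ pe.2.toNat) 1

-- ===== PRECONDITION & SPEC =====
def Spec_build_M_y (K_max : Int) (allow_even_exps : Bool) (allow_one_odd_euler : Bool) (out : Int) : Prop := out = build_M_y_alt K_max allow_even_exps allow_one_odd_euler
instance (K_max : Int) (allow_even_exps : Bool) (allow_one_odd_euler : Bool) (out : Int) : Decidable (Spec_build_M_y K_max allow_even_exps allow_one_odd_euler out) := by unfold Spec_build_M_y; infer_instance

-- ===== CLAIM (what is proved, stated in full; the proofs are below) =====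
def Claim_equal_build_M_y : Prop := ∀ (K_max : Int) (allow_even_exps : Bool) (allow_one_odd_euler : Bool), Dom_build_M_y K_max allow_even_exps allow_one_odd_euler → Spec_build_M_y K_max allow_even_exps allow_one_odd_euler (build_M_y K_max allow_even_exps allow_one_odd_euler)

-- ===== LEMMAS AND PROOFS =====

------------------------------------------------------------------------------
-- A-side: A's set/filter construction yields exactly the two arithmetic
-- progressions range(3, K+2, 2) and range(2, K+2, 4), so A = lcm_many of them.
------------------------------------------------------------------------------

-- any pyRange with a positive step is strictly increasing
lemma pairwise_lt_pyRange_pos (a b s : Int) (hs : 0 < s) :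
    (PySem.List.pyRange a b s).Pairwise (· < ·) := by
  rw [PySem.List.pyRange_of_pos a b hs]
  refine List.Pairwise.map _ (fun i j (hij : i < j) => ?_) (List.pairwise_lt_range)
  have : (i : Int) < (j : Int) := by exact_mod_cast hij
  nlinarith

-- two strictly increasing integer lists with the same members are equal
lemma eq_of_mem_iff_pairwise_lt {l₁ l₂ : List Int}
    (h₁ : l₁.Pairwise (· < ·)) (h₂ : l₂.Pairwise (· < ·))
    (hm : ∀ x, x ∈ l₁ ↔ x ∈ l₂) : l₁ = l₂ := by
  have n₁ : l₁.Nodup := h₁.imp (fun h => ne_of_lt h)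
  have n₂ : l₂.Nodup := h₂.imp (fun h => ne_of_lt h)
  exact List.Perm.eq_of_pairwise (fun a b _ _ hab hba => absurd hba (not_lt_of_gt hab))
    h₁ h₂ ((List.perm_ext_iff_of_nodup n₁ n₂).2 hm)

-- A's first selection (+1 of the even e in range(2, K_max+1)) is exactly range(3, K_max+2, 2)
lemma family1_eq (K : Int) :
    ((PySem.List.pyRange 2 (K + 1) 1).filter (fun e => PySem.Int.mod e 2 == 0)).map (fun e => e + 1)
      = PySem.List.pyRange 3 (K + 2) 2 := by
  apply eq_of_mem_iff_pairwise_lt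
  · refine List.Pairwise.map _ (fun a b h => by omega) (List.Pairwise.filter _ (PySem.List.pairwise_lt_pyRange_one 2 (K + 1)))
  · exact pairwise_lt_pyRange_pos 3 (K + 2) 2 (by norm_num)
  · intro x
    simp only [List.mem_map, List.mem_filter, PySem.List.mem_pyRange_one,
      PySem.List.mem_pyRange_iff_of_pos (by norm_num : (0:Int) < 2) x, beq_iff_eq,
      PySem.Int.mod_eq_zero_iff_dvd]
    constructor
    · rintro ⟨e, ⟨⟨h1, h2⟩, hd⟩, rfl⟩; omega
    · rintro ⟨h1, h2, hd⟩; exact ⟨x - 1, ⟨⟨by omega, by omega⟩, by omega⟩, by omega⟩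

-- A's second selection (+1 of the e ≡ 1 (mod 4) in range(1, K_max+1, 2)) is exactly range(2, K_max+2, 4)
lemma family2_eq (K : Int) :
    ((PySem.List.pyRange 1 (K + 1) 2).filter (fun e => PySem.Int.mod e 4 == 1)).map (fun e => e + 1)
      = PySem.List.pyRange 2 (K + 2) 4 := by
  apply eq_of_mem_iff_pairwise_lt
  · refine List.Pairwise.map _ (fun a b h => by omega) (List.Pairwise.filter _ (pairwise_lt_pyRange_pos 1 (K + 1) 2 (by norm_num)))
  · exact pairwise_lt_pyRange_pos 2 (K + 2) 4 (by norm_num)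
  · intro x
    simp only [List.mem_map, List.mem_filter,
      PySem.List.mem_pyRange_iff_of_pos (by norm_num : (0:Int) < 2),
      PySem.List.mem_pyRange_iff_of_pos (by norm_num : (0:Int) < 4) x, beq_iff_eq]
    simp only [PySem.Int.mod_eq_emod_of_pos (a := _) (by norm_num : (0:Int) < 4)]
    constructor
    · rintro ⟨e, ⟨⟨h1, h2, hd⟩, hm⟩, rfl⟩; omega
    · rintro ⟨h1, h2, hd⟩; exact ⟨x - 1, ⟨⟨by omega, by omega, by omega⟩, by omega⟩, by omega⟩

lemma twoLe_of_mem_family1 (K x : Int) (hx : x ∈ PySem.List.pyRange 3 (K + 2) 2) : 2 ≤ x := by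
  have := (PySem.List.mem_pyRange_iff_of_pos (by norm_num : (0:Int) < 2) x).1 hx
  omega

lemma twoLe_of_mem_family2 (K x : Int) (hx : x ∈ PySem.List.pyRange 2 (K + 2) 4) : 2 ≤ x := by
  have := (PySem.List.mem_pyRange_iff_of_pos (by norm_num : (0:Int) < 4) x).1 hx
  omega

-- the bounds filter in A keeps every selected value
lemma filter_keeps (K : Int) (l : List Int) (hl : ∀ x ∈ l, 2 ≤ x ∧ x ≤ K + 1) :
    l.filter (fun k => 2 ≤ k && k ≤ K + 1) = l := by
  apply List.filter_eq_self.2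
  intro x hx
  have := hl x hx
  simp only [Bool.and_eq_true, decide_eq_true_eq]
  omega

-- a conditional set-insertion loop is the update by the filtered, mapped list
lemma set_loop_eq (l : List Int) (p : Int → Bool) (s : PySem.Set Int) :
    l.foldl (fun s e => if p e then PySem.Set.add s (e + 1) else s) s
      = PySem.Set.update s ((l.filter p).map (fun e => e + 1)) := by
  rw [PySem.List.foldl_if_eq_foldl_filter p (fun s e => PySem.Set.add s (e + 1)) l s,
    ← PySem.Set.update_map_eq_foldl_add]

lemma nodup_family1 (K : Int) : (PySem.List.pyRange 3 (K + 2) 2).Nodup :=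
  (pairwise_lt_pyRange_pos 3 (K + 2) 2 (by norm_num)).imp (fun h => ne_of_lt h)

lemma nodup_family2 (K : Int) : (PySem.List.pyRange 2 (K + 2) 4).Nodup :=
  (pairwise_lt_pyRange_pos 2 (K + 2) 4 (by norm_num)).imp (fun h => ne_of_lt h)

-- the second family (≡ 2 mod 4) is disjoint from the first (odd values)
lemma family_disjoint (K : Int) :
    ∀ x ∈ PySem.List.pyRange 2 (K + 2) 4, x ∉ PySem.List.pyRange 3 (K + 2) 2 := by
  intro x hx hx'
  have h2 := (PySem.List.mem_pyRange_iff_of_pos (by norm_num : (0:Int) < 4) x).1 hx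
  have h1 := (PySem.List.mem_pyRange_iff_of_pos (by norm_num : (0:Int) < 2) x).1 hx'
  omega

-- A's first loop builds exactly the first family (as a set it is that list)
lemma loopA1_eq (K : Int) :
    (PySem.List.pyRange 2 (K + 1) 1).foldl
        (fun s e => if PySem.Int.mod e 2 == 0 then PySem.Set.add s (e + 1) else s) PySem.Set.empty
      = PySem.List.pyRange 3 (K + 2) 2 := by
  rw [set_loop_eq, family1_eq]
  exact (PySem.Set.update_nil_left _).trans (PySem.Set.ofList_eq_self_of_nodup _ (nodup_family1 K))

-- A's second loop appends exactly the second family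
lemma loopA2_eq (K : Int) (s : PySem.Set Int) (hs : ∀ x ∈ PySem.List.pyRange 2 (K + 2) 4, x ∉ s) :
    (PySem.List.pyRange 1 (K + 1) 2).foldl
        (fun s e => if PySem.Int.mod e 4 == 1 then PySem.Set.add s (e + 1) else s) s
      = s ++ PySem.List.pyRange 2 (K + 2) 4 := by
  rw [set_loop_eq, family2_eq]
  exact PySem.Set.update_eq_append_of_disjoint s _ (nodup_family2 K) hs

-- the final 'empty set' test collapses: lcm_many [] is 1 anyway
lemma if_empty_lcm (L : List Int) : (if L = [] then 1 else lcm_many L) = lcm_many L := by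
  split
  · simp_all [lcm_many]
  · rfl

lemma bounds_family1 (K : Int) : ∀ x ∈ PySem.List.pyRange 3 (K + 2) 2, 2 ≤ x ∧ x ≤ K + 1 := by
  intro x hx
  have := (PySem.List.mem_pyRange_iff_of_pos (by norm_num : (0:Int) < 2) x).1 hx
  omega

lemma bounds_family2 (K : Int) : ∀ x ∈ PySem.List.pyRange 2 (K + 2) 4, 2 ≤ x ∧ x ≤ K + 1 := by
  intro x hx
  have := (PySem.List.mem_pyRange_iff_of_pos (by norm_num : (0:Int) < 4) x).1 hx
  omega

-- A equals lcm_many of B's value list, flag case by flag case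
lemma buildA_eq_lcm_many (K : Int) (ae ao : Bool) :
    build_M_y K ae ao
      = lcm_many ((if ae then PySem.List.pyRange 3 (K + 2) 2 else [])
          ++ (if ao then PySem.List.pyRange 2 (K + 2) 4 else [])) := by
  cases ae <;> cases ao <;>
    simp only [build_M_y, if_true, if_false, Bool.false_eq_true, List.nil_append, List.append_nil]
  · rfl
  · rw [loopA2_eq K PySem.Set.empty (by intro x _ h; simp [PySem.Set.empty] at h)]
    rw [show (PySem.Set.empty : PySem.Set Int) ++ PySem.List.pyRange 2 (K + 2) 4
          = PySem.List.pyRange 2 (K + 2) 4 from List.nil_append _,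
      filter_keeps K _ (bounds_family2 K), if_empty_lcm]
  · rw [loopA1_eq K, filter_keeps K _ (bounds_family1 K), if_empty_lcm]
  · have hb : ∀ x ∈ PySem.List.pyRange 3 (K + 2) 2 ++ PySem.List.pyRange 2 (K + 2) 4,
        2 ≤ x ∧ x ≤ K + 1 := by
      intro x hx
      rcases List.mem_append.1 hx with h | h
      exacts [bounds_family1 K x h, bounds_family2 K x h]
    rw [loopA1_eq K, loopA2_eq K _ (family_disjoint K), filter_keeps K _ hb, if_empty_lcm]

------------------------------------------------------------------------------
-- B-side: correctness of trial division, and the dict of maximum exponents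
-- rebuilt as a product computes the running lcm.
------------------------------------------------------------------------------

-- product of the prime-power pairs of a list (also the rebuild of a dict's items)
def prodPE (l : List (Int × Int)) : Int := (l.map (fun pe => pe.1 ^ pe.2.toNat)).prod

-- the element invariant of factor lists and of the dict's items
def GoodPE (pe : Int × Int) : Prop := 2 ≤ pe.1 ∧ Nat.Prime pe.1.toNat ∧ 1 ≤ pe.2

def GoodDict (d : PySem.Dict Int Int) : Prop :=
  d.keys.Nodup ∧ ∀ pe ∈ d.items, GoodPE pe

lemma toNat_mul_of_nonneg (a b : Int) (ha : 0 ≤ a) (hb : 0 ≤ b) :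
    (a * b).toNat = a.toNat * b.toNat := by
  conv_lhs => rw [← Int.toNat_of_nonneg ha, ← Int.toNat_of_nonneg hb]
  rw [← Nat.cast_mul, Int.toNat_natCast]

lemma toNat_pow_of_nonneg (a : Int) (k : Nat) (ha : 0 ≤ a) :
    (a ^ k).toNat = a.toNat ^ k := by
  conv_lhs => rw [← Int.toNat_of_nonneg ha]
  rw [← Nat.cast_pow, Int.toNat_natCast]

lemma dvd_toNat_iff (a b : Int) (ha : 0 ≤ a) (hb : 0 ≤ b) :
    a.toNat ∣ b.toNat ↔ a ∣ b := by
  have h1 : a.natAbs = a.toNat := by omega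
  have h2 : b.natAbs = b.toNat := by omega
  rw [← h1, ← h2, Int.natAbs_dvd_natAbs]

lemma prodPE_cons (x : Int × Int) (l : List (Int × Int)) :
    prodPE (x :: l) = x.1 ^ x.2.toNat * prodPE l := by
  simp [prodPE]

lemma prodPE_append (l₁ l₂ : List (Int × Int)) :
    prodPE (l₁ ++ l₂) = prodPE l₁ * prodPE l₂ := by
  simp [prodPE]

lemma prodPE_pos (l : List (Int × Int)) (hl : ∀ pe ∈ l, GoodPE pe) : 1 ≤ prodPE l := by
  induction l with
  | nil => simp [prodPE]
  | cons x t ih =>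
    rw [prodPE_cons]
    have h1 : (1 : Int) ≤ x.1 ^ x.2.toNat :=
      one_le_pow₀ (by have := (hl x (by simp)).1; omega)
    have h2 := ih (fun pe hpe => hl pe (by simp [hpe]))
    nlinarith

-- a prime ≥ 2 divides no product of prime powers with keys different from it
lemma prime_not_dvd_prodPE (p : Int) (hp : Nat.Prime p.toNat) (hp2 : 2 ≤ p)
    (l : List (Int × Int)) :
    (∀ pe ∈ l, GoodPE pe ∧ pe.1 ≠ p) → ¬ (p ∣ prodPE l) := by
  have hpZ : Prime p := by
    rw [Int.prime_iff_natAbs_prime]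
    have hab : p.natAbs = p.toNat := by omega
    rw [hab]; exact hp
  induction l with
  | nil =>
    intro _ h
    simp only [prodPE, List.map_nil, List.prod_nil] at h
    have := Int.le_of_dvd one_pos h
    omega
  | cons x t ih =>
    intro hl h
    rw [prodPE_cons] at h
    rcases hpZ.dvd_mul.1 h with h' | h'
    · have hx := hl x (by simp)
      have hdx : p ∣ x.1 := hpZ.dvd_of_dvd_pow h'
      have h2x : 2 ≤ x.1 := hx.1.1
      have hdn : p.toNat ∣ x.1.toNat := (dvd_toNat_iff p x.1 (by omega) (by omega)).2 hdx
      rcases Nat.Prime.eq_one_or_self_of_dvd hx.1.2.1 _ hdn with h1 | h1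
      · have := hp.two_le; omega
      · exact hx.2 (by omega)
    · exact ih (fun pe hpe => hl pe (by simp [hpe])) h'

-- Nat: lcm of R·p^a with p^b for a prime p not dividing R
lemma nat_lcm_mul_pp (R p a b : Nat) (hp : p.Prime) (hR : ¬ p ∣ R) :
    Nat.lcm (R * p ^ a) (p ^ b) = R * p ^ (max a b) := by
  have hco : Nat.Coprime p R := (Nat.Prime.coprime_iff_not_dvd hp).2 hR
  have hcoR : Nat.Coprime R (p ^ max a b) := (Nat.Coprime.pow_left _ hco).symm
  apply Nat.dvd_antisymm
  · exact Nat.lcm_dvd (Nat.mul_dvd_mul_left R (pow_dvd_pow p (le_max_left a b)))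
      (dvd_mul_of_dvd_right (pow_dvd_pow p (le_max_right a b)) R)
  · refine Nat.Coprime.mul_dvd_of_dvd_of_dvd hcoR
      (dvd_trans (dvd_mul_right R (p ^ a)) (Nat.dvd_lcm_left _ _)) ?_
    rcases max_cases a b with ⟨hmax, _⟩ | ⟨hmax, _⟩
    · rw [hmax]; exact dvd_trans (dvd_mul_left (p ^ a) R) (Nat.dvd_lcm_left _ _)
    · rw [hmax]; exact Nat.dvd_lcm_right _ _

-- the same fact lifted to Int through toNat
lemma int_lcm_pp (R p : Int) (a b : Nat) (hR : 1 ≤ R) (hp2 : 2 ≤ p)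
    (hpp : Nat.Prime p.toNat) (hnd : ¬ p ∣ R) :
    ((Nat.lcm (R * p ^ a).toNat ((p : Int) ^ b).toNat : Nat) : Int) = R * p ^ (max a b) := by
  have hRn : (R * p ^ a).toNat = R.toNat * p.toNat ^ a := by
    rw [toNat_mul_of_nonneg R _ (by omega) (pow_nonneg (by omega) a),
      toNat_pow_of_nonneg p a (by omega)]
  have hpn : ((p : Int) ^ b).toNat = p.toNat ^ b := toNat_pow_of_nonneg p b (by omega)
  have hndn : ¬ p.toNat ∣ R.toNat := fun h => hnd ((dvd_toNat_iff p R (by omega) (by omega)).1 h)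
  rw [hRn, hpn, nat_lcm_mul_pp R.toNat p.toNat a b hpp hndn]
  push_cast [Int.toNat_of_nonneg (show (0:Int) ≤ R by omega),
    Int.toNat_of_nonneg (show (0:Int) ≤ p by omega)]
  ring

-- Python's lcm on positive ints, through Nat
lemma pyLcm_eq_natLcm (a b : Int) (ha : 1 ≤ a) (hb : 1 ≤ b) :
    pyLcm a b = ((Nat.lcm a.toNat b.toNat : Nat) : Int) := by
  unfold pyLcm
  obtain ⟨m, rfl⟩ : ∃ m : Nat, a = (m : Int) := ⟨a.toNat, (Int.toNat_of_nonneg (by omega)).symm⟩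
  obtain ⟨n, rfl⟩ : ∃ n : Nat, b = (n : Int) := ⟨b.toNat, (Int.toNat_of_nonneg (by omega)).symm⟩
  have hg : Int.gcd (m : Int) (n : Int) = Nat.gcd m n := by
    simp [Int.gcd]
  rw [hg, show |(m : Int) * n| = ((m * n : Nat) : Int) by
    rw [abs_of_nonneg (by positivity)]; push_cast; ring]
  rw [PySem.Int.floordiv_natCast]
  simp [Nat.lcm]

-- the while-loop extracts the full power of p
lemma trialDivLoop_spec (p : Int) (hp : 2 ≤ p) :
    ∀ (fuel : Nat) (n e : Int), n.toNat ≤ fuel → 1 ≤ n →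
      ∃ (k : Nat) (m : Int), trialDivLoop p n e = (m, e + (k : Int)) ∧
        n = p ^ k * m ∧ 1 ≤ m ∧ ¬ (p ∣ m) := by
  intro fuel
  induction fuel with
  | zero => intro n e hf hn; exfalso; omega
  | succ f ih =>
    intro n e hf hn
    rw [trialDivLoop]
    by_cases hc : 2 ≤ p ∧ 1 ≤ n ∧ PySem.Int.mod n p = 0
    · rw [dif_pos hc]
      obtain ⟨-, -, hm⟩ := hc
      have hd : p ∣ n := (PySem.Int.mod_eq_zero_iff_dvd n p).1 hm
      obtain ⟨q, hq⟩ := hd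
      have hfd : PySem.Int.floordiv n p = q := by
        rw [hq, PySem.Int.floordiv_eq_ediv_of_pos (by omega),
          Int.mul_ediv_cancel_left _ (by omega : p ≠ 0)]
      have hq1 : 1 ≤ q := by nlinarith
      have hlt := trial_div_lt p n ⟨hp, hn, hm⟩
      obtain ⟨k, m, h1, h2, h3, h4⟩ := ih (PySem.Int.floordiv n p) (e + 1) (by omega)
        (by rw [hfd]; exact hq1)
      refine ⟨k + 1, m, ?_, ?_, h3, h4⟩
      · rw [h1]; congr 1; push_cast; ring
      · rw [hfd] at h2; rw [hq, h2, pow_succ]; ring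
    · rw [dif_neg hc]
      refine ⟨0, n, by simp, by simp, hn, ?_⟩
      intro hdvd
      exact hc ⟨hp, hn, (PySem.Int.mod_eq_zero_iff_dvd n p).2 hdvd⟩

-- the outer loop's invariant: remaining n has no factor below p; collected pairs
-- are good, increasing, and multiply (with n) back to the original value
lemma factorLoop_spec :
    ∀ (c : Nat) (n p : Int) (fs : List (Int × Int)),
      (n + 1 - p).toNat ≤ c → 2 ≤ p → 1 ≤ n →
      (∀ q : Int, 2 ≤ q → q ∣ n → p ≤ q) →
      (∀ pe ∈ fs, GoodPE pe ∧ pe.1 < p) →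
      fs.Pairwise (fun x y => x.1 < y.1) →
      1 ≤ (factorLoop n p fs).1 ∧
      (∀ pe ∈ (factorLoop n p fs).2, GoodPE pe) ∧
      (factorLoop n p fs).2.Pairwise (fun x y => x.1 < y.1) ∧
      prodPE (factorLoop n p fs).2 * (factorLoop n p fs).1 = prodPE fs * n ∧
      ((factorLoop n p fs).1 = 1 ∨
        (Nat.Prime (factorLoop n p fs).1.toNat ∧
          ∀ pe ∈ (factorLoop n p fs).2, pe.1 < (factorLoop n p fs).1)) := by
  have exit : ∀ (n p : Int) (fs : List (Int × Int)), 2 ≤ p → 1 ≤ n → n < p * p →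
      (∀ q : Int, 2 ≤ q → q ∣ n → p ≤ q) →
      (∀ pe ∈ fs, GoodPE pe ∧ pe.1 < p) →
      fs.Pairwise (fun x y => x.1 < y.1) →
      1 ≤ n ∧ (∀ pe ∈ fs, GoodPE pe) ∧ fs.Pairwise (fun x y => x.1 < y.1) ∧
      prodPE fs * n = prodPE fs * n ∧
      (n = 1 ∨ (Nat.Prime n.toNat ∧ ∀ pe ∈ fs, pe.1 < n)) := by
    intro n p fs hp hn hnp hdiv hfs hpair
    refine ⟨hn, fun pe hpe => (hfs pe hpe).1, hpair, rfl, ?_⟩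
    by_cases hone : n = 1
    · exact Or.inl hone
    · refine Or.inr ?_
      have h2n : 2 ≤ n := by omega
      have hnprime : Nat.Prime n.toNat := by
        by_contra hnp2
        have hsq := Nat.minFac_sq_le_self (show 0 < n.toNat by omega) hnp2
        have hdvd : (n.toNat.minFac : Int) ∣ n := by
          have h' : ((n.toNat.minFac : Nat) : Int) ∣ ((n.toNat : Nat) : Int) :=
            Int.natCast_dvd_natCast.2 (Nat.minFac_dvd n.toNat)
          rwa [Int.toNat_of_nonneg (by omega)] at h'
        have hminprime : Nat.Prime n.toNat.minFac := Nat.minFac_prime (by omega)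
        have h2min : 2 ≤ (n.toNat.minFac : Int) := by exact_mod_cast hminprime.two_le
        have hge := hdiv _ h2min hdvd
        have hsq' : ((n.toNat.minFac ^ 2 : Nat) : Int) ≤ ((n.toNat : Nat) : Int) :=
          Nat.cast_le.2 hsq
        rw [Int.toNat_of_nonneg (by omega)] at hsq'
        push_cast at hsq'
        nlinarith
      refine ⟨hnprime, fun pe hpe => ?_⟩
      have hpn : p ≤ n := hdiv n h2n dvd_rfl
      have := (hfs pe hpe).2
      omega
  intro c
  induction c with
  | zero =>
    intro n p fs hc hp hn hdiv hfs hpair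
    have hpn1 : n + 1 ≤ p := by omega
    have hg : ¬ (2 ≤ p ∧ p * p ≤ n) := by
      rintro ⟨h1, h2⟩
      nlinarith
    rw [factorLoop, dif_neg hg]
    exact exit n p fs hp hn (by nlinarith) hdiv hfs hpair
  | succ c ih =>
    intro n p fs hc hp hn hdiv hfs hpair
    rw [factorLoop]
    by_cases hg : 2 ≤ p ∧ p * p ≤ n
    · rw [dif_pos hg]
      obtain ⟨k, m, heq, hnm, hm1, hmd⟩ := trialDivLoop_spec p hp n.toNat n 0 le_rfl hn
      have hpn : p ≤ n := by nlinarith [hg.2]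
      have hak : (1 : Int) ≤ p ^ k := one_le_pow₀ (by omega)
      have hmn : m ≤ n := by nlinarith
      simp only [heq, zero_add]
      by_cases hk : k = 0
      · subst hk
        rw [if_neg (by simp)]
        have hmeq : m = n := by rw [hnm]; simp
        subst hmeq
        apply ih m (p + 1) fs (by omega) (by omega) hm1 ?_
          (fun pe hpe => ⟨(hfs pe hpe).1, by have := (hfs pe hpe).2; omega⟩) hpair
        intro q hq hdq
        have := hdiv q hq hdq
        by_cases hqa : q = p
        · subst hqa; exact absurd hdq hmd
        · omega
      · rw [if_pos (by exact_mod_cast hk)]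
        have hk1 : 1 ≤ k := Nat.one_le_iff_ne_zero.2 hk
        have hadvd : p ∣ n := by
          rw [hnm]; exact Dvd.dvd.mul_right (dvd_pow_self p hk) m
        have hprime : Nat.Prime p.toNat := by
          rw [Nat.prime_def_lt]
          refine ⟨by omega, ?_⟩
          intro d hd hdd
          by_contra hd1
          have hd2 : 2 ≤ d := by
            rcases d with _ | _ | d
            · exact absurd (Nat.eq_zero_of_zero_dvd hdd) (by omega)
            · exact absurd rfl hd1
            · omega
          have hdint : (d : Int) ∣ p := by
            have h' : (d : Int) ∣ ((p.toNat : Nat) : Int) := Int.natCast_dvd_natCast.2 hdd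
            rwa [Int.toNat_of_nonneg (by omega)] at h'
          have h5 : p ≤ (d : Int) := hdiv d (by exact_mod_cast hd2) (dvd_trans hdint hadvd)
          omega
        have hgoodnew : GoodPE (p, (k : Int)) :=
          ⟨hp, hprime, (by exact_mod_cast hk1 : (1 : Int) ≤ (k : Int))⟩
        have hres := ih m (p + 1) (fs ++ [(p, (k : Int))]) (by omega) (by omega) hm1
          ?_ ?_ ?_
        · obtain ⟨hA, hB, hC, hD, hE⟩ := hres
          refine ⟨hA, hB, hC, ?_, hE⟩
          rw [hD, prodPE_append,
            show prodPE [(p, (k : Int))] = p ^ k from by simp [prodPE], hnm]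
          ring
        · intro q hq hdq
          have hqn : q ∣ n := by rw [hnm]; exact Dvd.dvd.mul_left hdq _
          have := hdiv q hq hqn
          by_cases hqa : q = p
          · subst hqa; exact absurd hdq hmd
          · omega
        · intro pe hpe
          rcases List.mem_append.1 hpe with hh | hh
          · exact ⟨(hfs pe hh).1, by have := (hfs pe hh).2; omega⟩
          · rcases List.mem_singleton.1 hh with rfl
            exact ⟨hgoodnew, by simp⟩
        · rw [List.pairwise_append]
          refine ⟨hpair, List.pairwise_singleton _ _, ?_⟩
          intro x hx y hy
          rcases List.mem_singleton.1 hy with rfl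
          exact (hfs x hx).2
    · rw [dif_neg hg]
      have hnp : n < p * p := by by_contra h; exact hg ⟨hp, by omega⟩
      exact exit n p fs hp hn hnp hdiv hfs hpair

lemma pyFactor_spec (v : Int) (hv : 2 ≤ v) :
    (∀ pe ∈ pyFactor v, GoodPE pe) ∧
    (pyFactor v).Pairwise (fun x y => x.1 < y.1) ∧
    prodPE (pyFactor v) = v := by
  obtain ⟨h1, h2, h3, h4, h5⟩ := factorLoop_spec ((v - 1).toNat) v 2 [] (by omega) (le_refl 2)
    (by omega) (fun q hq _ => hq) (by simp) List.Pairwise.nil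
  simp only [prodPE, List.map_nil, List.prod_nil, one_mul] at h4
  simp only [pyFactor]
  rcases h5 with hone | ⟨hpr, hkeys⟩
  · rw [hone, if_neg (by omega)]
    exact ⟨h2, h3, by rw [hone, mul_one] at h4; exact h4⟩
  · have h2r : 2 ≤ (factorLoop v 2 []).1 := by have := hpr.two_le; omega
    rw [if_pos (by omega)]
    refine ⟨?_, ?_, ?_⟩
    · intro pe hpe
      rcases List.mem_append.1 hpe with hh | hh
      · exact h2 pe hh
      · rcases List.mem_singleton.1 hh with rfl
        exact ⟨h2r, hpr, le_refl 1⟩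
    · rw [List.pairwise_append]
      refine ⟨h3, List.pairwise_singleton _ _, ?_⟩
      intro x hx y hy
      rcases List.mem_singleton.1 hy with rfl
      exact hkeys x hx
    · rw [prodPE_append,
        show prodPE [((factorLoop v 2 []).1, 1)] = (factorLoop v 2 []).1 from by simp [prodPE]]
      exact h4

-- split a dict's items at a present key (keys are unique)
lemma items_split (d : PySem.Dict Int Int) (p e' : Int) (hnd : d.keys.Nodup)
    (h : d.get? p = some e') :
    ∃ l₁ l₂, d.items = l₁ ++ (p, e') :: l₂ ∧ (∀ q ∈ l₁, q.1 ≠ p) ∧ (∀ q ∈ l₂, q.1 ≠ p) := by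
  have hm : (p, e') ∈ d.items := PySem.Dict.mem_items_of_get?_eq_some d h
  obtain ⟨l₁, l₂, hsp⟩ := List.append_of_mem hm
  have hk : (d.items.map Prod.fst).Nodup := by
    have hkeq : d.keys = d.items.map Prod.fst := by simp [PySem.Dict.keys]
    rwa [hkeq] at hnd
  rw [hsp] at hk
  simp only [List.map_append, List.map_cons] at hk
  rcases List.nodup_append.mp hk with ⟨hA, hB, hdisj⟩
  have hpB : p ∉ l₂.map Prod.fst := (List.nodup_cons.1 hB).1
  have hpA : p ∉ l₁.map Prod.fst := fun hx => (hdisj p hx p (by simp)) rfl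
  refine ⟨l₁, l₂, hsp, ?_, ?_⟩
  · intro q hq hqp
    have hmm : q.1 ∈ l₁.map Prod.fst := List.mem_map_of_mem hq
    rw [hqp] at hmm
    exact hpA hmm
  · intro q hq hqp
    have hmm : q.1 ∈ l₂.map Prod.fst := List.mem_map_of_mem hq
    rw [hqp] at hmm
    exact hpB hmm

-- one merge step: the rebuilt product becomes the lcm with p^e
lemma mergeOne_spec (d : PySem.Dict Int Int) (p e : Int) (hd : GoodDict d)
    (hp2 : 2 ≤ p) (hpp : Nat.Prime p.toNat) (he : 1 ≤ e) :
    GoodDict (if PySem.Dict.getD d p 0 < e then PySem.Dict.insert d p e else d) ∧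
    prodPE (if PySem.Dict.getD d p 0 < e then PySem.Dict.insert d p e else d).items
      = ((Nat.lcm (prodPE d.items).toNat (p ^ e.toNat).toNat : Nat) : Int) := by
  obtain ⟨hnd, hitems⟩ := hd
  have hgpe : GoodPE (p, e) := ⟨hp2, hpp, he⟩
  have hgooditems : ∀ pe' ∈ (PySem.Dict.insert d p e).items, GoodPE pe' := by
    intro pe' hpe'
    rcases (PySem.Dict.mem_items_insert d p e pe').1 hpe' with hh | ⟨hh, -⟩
    · rw [hh]; exact hgpe
    · exact hitems pe' hh
  by_cases hcon : d.contains p = true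
  · have hsome : ∃ e', d.get? p = some e' := by
      rw [PySem.Dict.contains_eq_isSome_get?] at hcon
      exact Option.isSome_iff_exists.1 hcon
    obtain ⟨e', he'⟩ := hsome
    have hgd : PySem.Dict.getD d p 0 = e' := PySem.Dict.getD_of_get?_eq_some d 0 he'
    obtain ⟨l₁, l₂, hsp, h1, h2⟩ := items_split d p e' hnd he'
    have hall : GoodPE (p, e') := hitems _ (by rw [hsp]; simp)
    have he'1 : 1 ≤ e' := hall.2.2
    have hRform : prodPE d.items = (prodPE l₁ * prodPE l₂) * p ^ e'.toNat := by
      rw [hsp, prodPE_append, prodPE_cons]; ring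
    have hRR : 1 ≤ prodPE l₁ * prodPE l₂ := by
      have a1 := prodPE_pos l₁ (fun pe hpe => hitems pe (by rw [hsp]; simp [hpe]))
      have a2 := prodPE_pos l₂ (fun pe hpe => hitems pe (by rw [hsp]; simp [hpe]))
      nlinarith
    have hndvd : ¬ p ∣ (prodPE l₁ * prodPE l₂) := by
      rw [← prodPE_append]
      apply prime_not_dvd_prodPE p hpp hp2
      intro pe hpe
      rcases List.mem_append.1 hpe with hh | hh
      · exact ⟨hitems pe (by rw [hsp]; simp [hh]), h1 pe hh⟩
      · exact ⟨hitems pe (by rw [hsp]; simp [hh]), h2 pe hh⟩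
    have hknodup : (PySem.Dict.insert d p e).keys.Nodup := by
      rw [PySem.Dict.keys_insert_of_contains d e hcon]
      exact hnd
    rw [hgd]
    by_cases hlt : e' < e
    · rw [if_pos hlt]
      refine ⟨⟨hknodup, hgooditems⟩, ?_⟩
      have hitems' : (PySem.Dict.insert d p e).items = l₁ ++ (p, e) :: l₂ := by
        rw [PySem.Dict.items_insert_of_contains d e hcon, hsp, List.map_append, List.map_cons]
        congr 1
        · have hmc : ∀ q ∈ l₁, (fun q => if q.1 == p then (p, e) else q) q = q := by
            intro q hq; simp [h1 q hq]
          rw [List.map_congr_left hmc]; simp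
        · congr 1
          · simp
          · have hmc : ∀ q ∈ l₂, (fun q => if q.1 == p then (p, e) else q) q = q := by
              intro q hq; simp [h2 q hq]
            rw [List.map_congr_left hmc]; simp
      rw [hitems', prodPE_append, prodPE_cons, hRform,
        int_lcm_pp (prodPE l₁ * prodPE l₂) p e'.toNat e.toNat hRR hp2 hpp hndvd,
        show max e'.toNat e.toNat = e.toNat from by omega]
      ring
    · rw [if_neg hlt]
      refine ⟨⟨hnd, hitems⟩, ?_⟩
      rw [hRform, int_lcm_pp _ p e'.toNat e.toNat hRR hp2 hpp hndvd,
        show max e'.toNat e.toNat = e'.toNat from by omega]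
  · have hcon' : d.contains p = false := by
      cases hcc : d.contains p
      · rfl
      · exact absurd hcc hcon
    have hgd : PySem.Dict.getD d p 0 = 0 := PySem.Dict.getD_of_not_contains d 0 hcon'
    have hpk : p ∉ d.keys := by
      intro hmem
      have := (PySem.Dict.contains_iff_mem_keys d p).2 hmem
      rw [hcon'] at this
      exact Bool.false_ne_true this
    have hndvd : ¬ p ∣ prodPE d.items := by
      apply prime_not_dvd_prodPE p hpp hp2
      intro pe hpe
      refine ⟨hitems pe hpe, ?_⟩
      intro hq
      exact hpk (hq ▸ PySem.Dict.mem_keys_of_mem_items d hpe)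
    have hRpos : 1 ≤ prodPE d.items := prodPE_pos _ hitems
    rw [hgd, if_pos (by omega)]
    constructor
    · refine ⟨?_, hgooditems⟩
      rw [PySem.Dict.keys_insert_of_not_contains d e hcon']
      exact List.Nodup.append hnd (List.nodup_singleton p)
        (by simpa [List.disjoint_singleton] using hpk)
    · rw [PySem.Dict.items_insert_of_not_contains d e hcon', prodPE_append,
        show prodPE [(p, e)] = p ^ e.toNat from by simp [prodPE]]
      have hl := int_lcm_pp (prodPE d.items) p 0 e.toNat hRpos hp2 hpp hndvd
      rw [pow_zero, mul_one] at hl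
      rw [hl, show max 0 e.toNat = e.toNat from by omega]

-- merging a whole factor list computes the lcm with its product
lemma merge_factor_fold (fs : List (Int × Int)) :
    ∀ d : PySem.Dict Int Int, GoodDict d →
      (∀ pe ∈ fs, GoodPE pe) → fs.Pairwise (fun x y => x.1 < y.1) →
      GoodDict (fs.foldl
        (fun d pe => if PySem.Dict.getD d pe.1 0 < pe.2 then PySem.Dict.insert d pe.1 pe.2 else d) d) ∧
      prodPE ((fs.foldl
        (fun d pe => if PySem.Dict.getD d pe.1 0 < pe.2 then PySem.Dict.insert d pe.1 pe.2 else d) d).items)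
        = ((Nat.lcm (prodPE d.items).toNat (prodPE fs).toNat : Nat) : Int) := by
  induction fs with
  | nil =>
    intro d hd _ _
    refine ⟨hd, ?_⟩
    have hpos := prodPE_pos d.items hd.2
    simp only [List.foldl_nil]
    rw [show prodPE ([] : List (Int × Int)) = 1 from rfl,
      show ((1 : Int)).toNat = 1 from rfl, Nat.lcm_one_right, Int.toNat_of_nonneg (by omega)]
  | cons x t ih =>
    intro d hd hgood hpair
    simp only [List.foldl_cons]
    have hx : GoodPE x := hgood x (by simp)
    obtain ⟨hg1, hprod1⟩ := mergeOne_spec d x.1 x.2 hd hx.1 hx.2.1 hx.2.2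
    obtain ⟨hg2, hprod2⟩ := ih _ hg1 (fun pe hpe => hgood pe (by simp [hpe]))
      (List.pairwise_cons.1 hpair).2
    refine ⟨hg2, ?_⟩
    rw [hprod2, hprod1, Int.toNat_natCast, prodPE_cons]
    have hT1 : 1 ≤ prodPE t :=
      prodPE_pos t (fun pe hpe => hgood pe (by simp [hpe]))
    have hX0 : (0 : Int) ≤ x.1 ^ x.2.toNat := pow_nonneg (by have := hx.1; omega) _
    have hndT : ¬ x.1 ∣ prodPE t := by
      apply prime_not_dvd_prodPE x.1 hx.2.1 hx.1
      intro pe hpe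
      refine ⟨hgood pe (by simp [hpe]), ?_⟩
      have := (List.pairwise_cons.1 hpair).1 pe hpe
      omega
    have hco : Nat.Coprime ((x.1 ^ x.2.toNat).toNat) ((prodPE t).toNat) := by
      rw [toNat_pow_of_nonneg x.1 _ (by have := hx.1; omega)]
      exact Nat.Coprime.pow_left _ ((Nat.Prime.coprime_iff_not_dvd hx.2.1).2
        (fun h => hndT ((dvd_toNat_iff x.1 (prodPE t) (by have := hx.1; omega) (by omega)).1 h)))
    rw [toNat_mul_of_nonneg _ _ hX0 (by omega), Nat.lcm_assoc, Nat.Coprime.lcm_eq_mul hco]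

-- the outer loop over the selected values computes the running lcm fold
lemma merge_values_fold (values : List Int) :
    ∀ d : PySem.Dict Int Int, GoodDict d → (∀ v ∈ values, 2 ≤ v) →
      GoodDict (values.foldl (fun d v =>
        (pyFactor v).foldl
          (fun d pe => if PySem.Dict.getD d pe.1 0 < pe.2 then PySem.Dict.insert d pe.1 pe.2 else d)
          d) d) ∧
      prodPE ((values.foldl (fun d v =>
        (pyFactor v).foldl
          (fun d pe => if PySem.Dict.getD d pe.1 0 < pe.2 then PySem.Dict.insert d pe.1 pe.2 else d)
          d) d).items)
        = values.foldl pyLcm (prodPE d.items) := by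
  induction values with
  | nil => intro d hd _; exact ⟨hd, rfl⟩
  | cons v t ih =>
    intro d hd hv
    simp only [List.foldl_cons]
    have h2 : 2 ≤ v := hv v (by simp)
    obtain ⟨hg, hp, hprod⟩ := pyFactor_spec v h2
    obtain ⟨hg1, hprod1⟩ := merge_factor_fold (pyFactor v) d hd hg hp
    obtain ⟨hg2, hprod2⟩ := ih _ hg1 (fun w hw => hv w (by simp [hw]))
    refine ⟨hg2, ?_⟩
    rw [hprod2, hprod1, hprod,
      ← pyLcm_eq_natLcm _ _ (prodPE_pos d.items hd.2) (by omega)]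

lemma foldl_mul_prodPE (l : List (Int × Int)) :
    ∀ c : Int, l.foldl (fun r pe => r * pe.1 ^ pe.2.toNat) c = c * prodPE l := by
  induction l with
  | nil => intro c; simp [prodPE]
  | cons x t ih =>
    intro c
    simp only [List.foldl_cons]
    rw [ih, prodPE, prodPE, List.map_cons, List.prod_cons, mul_assoc]

-- the shared core: lcm_many = the factorization dict rebuilt
lemma main_common (values : List Int) (hv : ∀ v ∈ values, 2 ≤ v) :
    lcm_many values
      = ((values.foldl (fun d v =>
          (pyFactor v).foldl
            (fun d pe => if PySem.Dict.getD d pe.1 0 < pe.2 then PySem.Dict.insert d pe.1 pe.2 else d)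
            d) PySem.Dict.empty).items).foldl (fun r pe => r * pe.1 ^ pe.2.toNat) 1 := by
  have hemp : GoodDict PySem.Dict.empty := by
    constructor
    · have : (PySem.Dict.empty : PySem.Dict Int Int).keys = [] := rfl
      rw [this]; exact List.nodup_nil
    · intro pe hpe
      have : (PySem.Dict.empty : PySem.Dict Int Int).items = [] := rfl
      rw [this] at hpe
      exact absurd hpe (List.not_mem_nil)
  obtain ⟨-, h⟩ := merge_values_fold values PySem.Dict.empty hemp hv
  rw [foldl_mul_prodPE _ 1, one_mul, h]
  rfl

-- ===== VERDICT (by name: the statement is the Claim_ definition above) =====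
theorem build_M_y_spec : Claim_equal_build_M_y := by
  intro K ae ao _
  show build_M_y K ae ao = build_M_y_alt K ae ao
  rw [buildA_eq_lcm_many]
  have hv : ∀ v ∈ (if ae then PySem.List.pyRange 3 (K + 2) 2 else [])
      ++ (if ao then PySem.List.pyRange 2 (K + 2) 4 else []), 2 ≤ v := by
    intro v hv
    rcases List.mem_append.1 hv with h | h
    · cases ae with
      | false => simp at h
      | true => exact twoLe_of_mem_family1 K v (by simpa using h)
    · cases ao with
      | false => simp at h
      | true => exact twoLe_of_mem_family2 K v (by simpa using h)
  rw [main_common _ hv]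
  rfl
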